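-- pv_equiv track=rewrite | github.com/K-Francis-H/url-book-cipher | book_cipher.py | indexSiteChars
-- ===== SOURCE A (Python) =====
-- def indexSiteChars(content):
-- 	index = {}
-- 	lineIndex = 0
-- 	charIndex = 0
--
-- 	lines = content.split("\n")
--
-- 	for line in lines:
-- 		for ch in line:
-- 			if ch not in index:
-- 				index[ch] = [ [lineIndex, charIndex] ]
-- 			else:
-- 				index[ch].append([lineIndex, charIndex])
-- 			charIndex = charIndex + 1
-- 		lineIndex = lineIndex + 1
-- 		charIndex = 0
-- 	return index
-- ===== SOURCE B (Python) =====
-- def indexSiteChars(content):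
--     index = {}
--     line = 0
--     col = 0
--     for ch in content:
--         if ch == "\n":
--             line += 1
--             col = 0
--         else:
--             index.setdefault(ch, []).append([line, col])
--             col += 1
--     return index
-- ===== Notes on version B (the rewrite author's own statement) =====
-- stated objective: simpler
-- what changed: Replaces splitting into lines plus nested line/char loops and an if/else dict update by a single flat pass over the raw string that tracks (line, col), resets them inline at each newline character, and records positions with dict.setdefault.
import Mathlib
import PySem

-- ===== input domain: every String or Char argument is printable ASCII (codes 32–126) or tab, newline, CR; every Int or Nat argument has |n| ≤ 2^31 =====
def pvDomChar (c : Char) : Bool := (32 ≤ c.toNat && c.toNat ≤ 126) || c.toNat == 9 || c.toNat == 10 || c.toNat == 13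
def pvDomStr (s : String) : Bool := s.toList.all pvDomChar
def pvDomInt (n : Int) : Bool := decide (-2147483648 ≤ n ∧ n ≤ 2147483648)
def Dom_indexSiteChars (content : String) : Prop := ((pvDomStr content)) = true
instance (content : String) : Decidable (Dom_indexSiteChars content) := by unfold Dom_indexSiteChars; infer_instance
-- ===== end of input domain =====

-- B replaces A's split-into-lines + nested loops by one flat pass over the raw string
-- that tracks (line, col) and resets at '\n' inline (objective: simpler).


-- ===== PORT A =====
-- dict keys are 1-char Python strings → String
def pvKey (ch : Char) : String := String.ofList [ch]

-- A's update: 'if ch not in index: index[ch] = [[li,ci]] else: index[ch].append([li,ci])'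
def pvUpdA (d : PySem.Dict String (List (List Int))) (ch : Char) (li ci : Int) :
    PySem.Dict String (List (List Int)) :=
  if d.contains (pvKey ch) = false then d.insert (pvKey ch) [[li, ci]]
  else d.modify (pvKey ch) [] (· ++ [[li, ci]])

-- body of A's inner 'for ch in line' loop (state: index, charIndex)
def pvInnerA (li : Int) (st : PySem.Dict String (List (List Int)) × Int) (ch : Char) :
    PySem.Dict String (List (List Int)) × Int :=
  (pvUpdA st.1 ch li st.2, st.2 + 1)

-- body of A's outer 'for line in lines' loop (state: index, lineIndex, charIndex)
def pvOuterA (st : PySem.Dict String (List (List Int)) × Int × Int) (line : List Char) :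
    PySem.Dict String (List (List Int)) × Int × Int :=
  ((line.foldl (pvInnerA st.2.1) (st.1, st.2.2)).1, st.2.1 + 1, 0)

def indexSiteChars (content : String) : List (String × List (List Int)) :=
  ((PySem.Chars.splitOn content.toList ['\n']).foldl pvOuterA
    (PySem.Dict.empty, 0, 0)).1.items

-- ===== PORT B =====
-- B's update: index.setdefault(ch, []).append([li, ci])
def pvAddB (d : PySem.Dict String (List (List Int))) (ch : Char) (li ci : Int) :
    PySem.Dict String (List (List Int)) :=
  d.modify (pvKey ch) [] (· ++ [[li, ci]])

-- body of B's single 'for ch in content' loop (state: index, line, col)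
def pvStepB (st : PySem.Dict String (List (List Int)) × Int × Int) (ch : Char) :
    PySem.Dict String (List (List Int)) × Int × Int :=
  if ch = '\n' then (st.1, st.2.1 + 1, 0)
  else (pvAddB st.1 ch st.2.1 st.2.2, st.2.1, st.2.2 + 1)

def indexSiteChars_alt (content : String) : List (String × List (List Int)) :=
  (content.toList.foldl pvStepB (PySem.Dict.empty, 0, 0)).1.items

-- ===== PRECONDITION & SPEC =====
def Spec_indexSiteChars (content : String) (out : List (String × List (List Int))) : Prop := out = indexSiteChars_alt content
instance (content : String) (out : List (String × List (List Int))) : Decidable (Spec_indexSiteChars content out) := by unfold Spec_indexSiteChars; infer_instance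

-- ===== CLAIM (what is proved, stated in full; the proofs are below) =====
def Claim_equal_indexSiteChars : Prop := ∀ (content : String), Dom_indexSiteChars content → Spec_indexSiteChars content (indexSiteChars content)

-- ===== LEMMAS AND PROOFS =====

-- proof-side characterisation of split("\n")
def mySplit : List Char → List (List Char)
  | [] => [[]]
  | c :: cs =>
      if c = '\n' then [] :: mySplit cs
      else
        match mySplit cs with
        | [] => [[c]]
        | h :: t => (c :: h) :: t

theorem mySplit_ne_nil (cs : List Char) : mySplit cs ≠ [] := by
  cases cs with
  | nil => simp [mySplit]
  | cons c cs =>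
    simp only [mySplit]
    split
    · simp
    · split <;> simp

theorem splitOn_go_eq (fuel : Nat) : ∀ (l cur : List Char) (accs : List (List Char)),
    l.length < fuel →
    PySem.Chars.splitOn.go ['\n'] fuel l cur accs =
      accs.reverse ++ (cur.reverse ++ (mySplit l).headI) :: (mySplit l).tail := by
  induction fuel with
  | zero => intro l cur accs h; omega
  | succ fuel ih =>
    intro l cur accs h
    cases l with
    | nil =>
      simp [PySem.Chars.splitOn.go, mySplit]
    | cons c rest =>
      simp only [PySem.Chars.splitOn.go]
      by_cases hc : c = '\n'
      · subst hc
        have hpre : List.isPrefixOf ['\n'] ('\n' :: rest) = true := by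
          simp [List.isPrefixOf]
        rw [if_pos hpre]
        simp only [List.length_cons, List.length_nil, List.drop_succ_cons, List.drop_zero]
        rw [ih rest [] (cur.reverse :: accs) (by simpa using Nat.lt_of_succ_lt_succ h)]
        obtain ⟨h0, t0, hht⟩ := List.exists_cons_of_ne_nil (mySplit_ne_nil rest)
        simp [mySplit, hht]
      · have hpre : List.isPrefixOf ['\n'] (c :: rest) = false := by
          simp [List.isPrefixOf]
          intro hcc; exact hc hcc.symm
        rw [if_neg (by simp [hpre])]
        rw [ih rest (c :: cur) accs (by simpa using Nat.lt_of_succ_lt_succ h)]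
        have hne := mySplit_ne_nil rest
        obtain ⟨h0, t0, hht⟩ := List.exists_cons_of_ne_nil hne
        simp [mySplit, hc, hht]

theorem splitOn_eq_mySplit (cs : List Char) :
    PySem.Chars.splitOn cs ['\n'] = mySplit cs := by
  have := splitOn_go_eq (cs.length + 1) cs [] [] (by omega)
  simp only [PySem.Chars.splitOn, this]
  have hne := mySplit_ne_nil cs
  obtain ⟨h0, t0, hht⟩ := List.exists_cons_of_ne_nil hne
  simp [hht]

theorem updA_eq_addB (d : PySem.Dict String (List (List Int))) (ch : Char) (li ci : Int) :
    pvUpdA d ch li ci = pvAddB d ch li ci := by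
  unfold pvUpdA pvAddB PySem.Dict.modify
  by_cases hc : d.contains (pvKey ch) = true
  · simp [hc]
  · have hf : d.contains (pvKey ch) = false := by simpa using hc
    have hget : d.get? (pvKey ch) = none := by
      rw [PySem.Dict.get?_eq_none_iff_contains]; exact hf
    simp [hf, PySem.Dict.getD, hget]

theorem main_fold (cs : List Char) :
    ∀ (d : PySem.Dict String (List (List Int))) (li ci : Int) (h : List Char)
      (t : List (List Char)), mySplit cs = h :: t →
    (cs.foldl pvStepB (d, li, ci)).1 =
      (t.foldl pvOuterA ((h.foldl (pvInnerA li) (d, ci)).1, li + 1, 0)).1 := by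
  induction cs with
  | nil =>
    intro d li ci h t hsplit
    simp [mySplit] at hsplit
    obtain ⟨rfl, rfl⟩ := hsplit
    simp
  | cons c cs ih =>
    intro d li ci h t hsplit
    obtain ⟨h0, t0, hht⟩ := List.exists_cons_of_ne_nil (mySplit_ne_nil cs)
    by_cases hc : c = '\n'
    · subst hc
      simp only [mySplit, if_pos] at hsplit
      injection hsplit with h1 h2
      subst h1; subst h2
      simp only [List.foldl_cons, pvStepB, if_pos]
      rw [ih d (li + 1) 0 h0 t0 hht]
      simp only [List.foldl_nil, hht, List.foldl_cons]
      have : pvOuterA (d, li + 1, 0) h0 = ((h0.foldl (pvInnerA (li + 1)) (d, 0)).1, li + 1 + 1, 0) := by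
        simp [pvOuterA]
      rw [this]
    · simp only [mySplit, if_neg hc, hht] at hsplit
      injection hsplit with h1 h2
      subst h1; subst h2
      simp only [List.foldl_cons, pvStepB, if_neg hc]
      rw [ih (pvAddB d c li ci) li (ci + 1) h0 t0 hht]
      have : pvInnerA li (d, ci) c = (pvAddB d c li ci, ci + 1) := by
        simp [pvInnerA, updA_eq_addB]
      simp only [this]

-- ===== VERDICT (by name: the statement is the Claim_ definition above) =====
theorem indexSiteChars_spec : Claim_equal_indexSiteChars := by
  intro content _
  unfold Spec_indexSiteChars indexSiteChars indexSiteChars_alt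
  rw [splitOn_eq_mySplit]
  obtain ⟨h0, t0, hht⟩ := List.exists_cons_of_ne_nil (mySplit_ne_nil content.toList)
  rw [main_fold content.toList PySem.Dict.empty 0 0 h0 t0 hht, hht]
  simp [pvOuterA]
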